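-- pv_equiv track=rewrite | github.com/smohapatra1/scripting | python/practice/start_again/2023/11042023/max_product_of_length_of_two_palindrome.py | max_length_palindrome
-- ===== SOURCE A (Python) =====
-- def max_length_palindrome(s: str) -> str:
--     n=len(s)
--     pali={} #bitmask
--     for mask in range(1, 1<<n ):
--         subseq = ""
--         for i in range(n):
--             if mask & (1 << i ):
--                 subseq +=s[i]
--         if subseq == subseq[::-1]:
--             pali[mask] = len(subseq)
--     res = 0
--     for mask1, length1 in pali.items():
--         for mask2, length2 in pali.items():
--             if mask1 & mask2 == 0:
--                 res = max(res, length1 * length2)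
--     return res
-- ===== SOURCE B (Python) =====
-- def max_length_palindrome(s: str) -> str:
--     n = len(s)
--     N = 1 << n
--     # plen[mask] = length of the subsequence if it is a palindrome, else 0
--     plen = [0] * N
--     for mask in range(1, N):
--         subseq = ""
--         for i in range(n):
--             if mask & (1 << i):
--                 subseq += s[i]
--         if subseq == subseq[::-1]:
--             plen[mask] = len(subseq)
--     # best[mask] = max palindromic-subsequence length over all submasks of mask
--     best = [0] * N
--     for mask in range(1, N):
--         b = plen[mask]
--         for i in range(n):
--             if mask & (1 << i):
--                 c = best[mask ^ (1 << i)]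
--                 if c > b:
--                     b = c
--         best[mask] = b
--     res = 0
--     for mask in range(1, N):
--         p = plen[mask] * best[(N - 1) ^ mask]
--         if p > res:
--             res = p
--     return res
-- ===== Notes on version B (the rewrite author's own statement) =====
-- stated objective: alternative
-- what changed: A pairs every palindromic mask with every other palindromic mask in a quadratic double loop over the dictionary of palindromic masks; B instead runs a submask dynamic programme best[mask] = max palindromic subsequence length inside mask and multiplies each mask's palindromic length with best[complement], trading the pairing loop over the dictionary for DP tables over all 2^n masks.
import Mathlib
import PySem

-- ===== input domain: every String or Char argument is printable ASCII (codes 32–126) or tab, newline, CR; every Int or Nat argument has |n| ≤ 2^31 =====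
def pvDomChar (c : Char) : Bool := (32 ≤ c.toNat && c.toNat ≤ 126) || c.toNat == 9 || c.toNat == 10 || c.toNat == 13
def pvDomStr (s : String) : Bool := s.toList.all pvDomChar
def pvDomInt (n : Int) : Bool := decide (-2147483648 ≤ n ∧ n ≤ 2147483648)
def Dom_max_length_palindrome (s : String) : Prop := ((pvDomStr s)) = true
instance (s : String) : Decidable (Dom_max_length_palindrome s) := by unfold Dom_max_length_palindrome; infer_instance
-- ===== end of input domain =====

-- B replaces A's double loop over all pairs of palindromic masks by a submask
-- dynamic programme (best[mask] = max palindromic length inside mask, answer from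
-- each mask's complement); equivalence of the returned value proved for all strings.

-- ===== PORT A =====
-- inner loop of A: build the subsequence of cs selected by mask
def pvSubseq (cs : List Char) (mask : Nat) : List Char :=
  (List.range cs.length).foldl
    (fun acc i => if mask &&& (1 <<< i) ≠ 0 then acc ++ [cs.getD i ' '] else acc) []

-- A's first loop: dict mask ↦ length for palindromic subsequences
def pvPaliDict (cs : List Char) : PySem.Dict Nat Nat :=
  ((List.range (1 <<< cs.length)).drop 1).foldl
    (fun d mask =>
      let subseq := pvSubseq cs mask
      if subseq = subseq.reverse then d.insert mask subseq.length else d)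
    PySem.Dict.empty

def max_length_palindrome (s : String) : Int :=
  let cs := s.toList
  let pali := pvPaliDict cs
  let res : Nat := pali.items.foldl
    (fun res p1 => pali.items.foldl
      (fun res p2 => if p1.1 &&& p2.1 = 0 then max res (p1.2 * p2.2) else res) res) 0
  (res : Int)

-- ===== PORT B =====
-- B's first loop: plen[mask] = length of the selected subsequence if palindromic, else 0
def pvPlen (cs : List Char) : List Nat :=
  ((List.range (1 <<< cs.length)).drop 1).foldl
    (fun a mask =>
      let subseq := (List.range cs.length).foldl
        (fun acc i => if mask &&& (1 <<< i) ≠ 0 then acc ++ [cs.getD i ' '] else acc) []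
      if subseq = subseq.reverse then a.set mask subseq.length else a)
    (List.replicate (1 <<< cs.length) 0)

-- B's second loop: best[mask] = max palindromic length over submasks of mask
def pvBest (n : Nat) (plen : List Nat) : List Nat :=
  ((List.range (1 <<< n)).drop 1).foldl
    (fun best mask =>
      best.set mask ((List.range n).foldl
        (fun b i =>
          if mask &&& (1 <<< i) ≠ 0 then
            let c := best.getD (mask ^^^ (1 <<< i)) 0
            if c > b then c else b
          else b)
        (plen.getD mask 0)))
    (List.replicate (1 <<< n) 0)

def max_length_palindrome_alt (s : String) : Int :=
  let cs := s.toList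
  let n := cs.length
  let plen := pvPlen cs
  let best := pvBest n plen
  let res : Nat := ((List.range (1 <<< n)).drop 1).foldl
    (fun res mask =>
      let p := plen.getD mask 0 * best.getD (((1 <<< n) - 1) ^^^ mask) 0
      if p > res then p else res) 0
  (res : Int)

-- ===== PRECONDITION & SPEC =====
def Spec_max_length_palindrome (s : String) (out : Int) : Prop := out = max_length_palindrome_alt s
instance (s : String) (out : Int) : Decidable (Spec_max_length_palindrome s out) := by unfold Spec_max_length_palindrome; infer_instance

-- ===== CLAIM (what is proved, stated in full; the proofs are below) =====
def Claim_equal_max_length_palindrome : Prop := ∀ (s : String), Dom_max_length_palindrome s → Spec_max_length_palindrome s (max_length_palindrome s)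

-- ===== LEMMAS AND PROOFS =====

-- abbreviations used only by the proofs
def pvPal (cs : List Char) (m : Nat) : Bool := pvSubseq cs m = (pvSubseq cs m).reverse
def pvPl (cs : List Char) (m : Nat) : Nat := if pvPal cs m then (pvSubseq cs m).length else 0
def pvMx (l : List Nat) : Nat := l.foldr max 0
-- G c = best palindromic subsequence length over submasks of c
def pvG (cs : List Char) (c : Nat) : Nat :=
  pvMx ((List.range (1 <<< cs.length)).map (fun m => if m &&& c = m then pvPl cs m else 0))

-- ---- pvMx toolkit ----
lemma le_pvMx_of_mem {x : Nat} {l : List Nat} (h : x ∈ l) : x ≤ pvMx l := by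
  induction l with
  | nil => cases h
  | cons a t ih =>
    rcases List.mem_cons.1 h with rfl | h
    · exact Nat.le_max_left _ _
    · exact le_trans (ih h) (Nat.le_max_right _ _)

lemma pvMx_cons (a : Nat) (l : List Nat) : pvMx (a :: l) = max a (pvMx l) := rfl

lemma pvMx_le {l : List Nat} {b : Nat} (h : ∀ x ∈ l, x ≤ b) : pvMx l ≤ b := by
  induction l with
  | nil => exact Nat.zero_le _
  | cons a t ih =>
    exact Nat.max_le.2 ⟨h a (List.mem_cons_self), ih fun x hx => h x (List.mem_cons_of_mem _ hx)⟩

lemma pvMx_map_mono {α : Type} {l : List α} {f g : α → Nat} (h : ∀ x ∈ l, f x ≤ g x) :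
    pvMx (l.map f) ≤ pvMx (l.map g) := by
  apply pvMx_le
  intro x hx
  rcases List.mem_map.1 hx with ⟨a, ha, rfl⟩
  exact le_trans (h a ha) (le_pvMx_of_mem (List.mem_map.2 ⟨a, ha, rfl⟩))

lemma nat_mul_max (a b c : Nat) : a * max b c = max (a * b) (a * c) := by
  rcases Nat.le_total b c with h | h
  · rw [Nat.max_eq_right h, Nat.max_eq_right (Nat.mul_le_mul_left a h)]
  · rw [Nat.max_eq_left h, Nat.max_eq_left (Nat.mul_le_mul_left a h)]

lemma pvMx_mul {α : Type} (a : Nat) (l : List α) (f : α → Nat) :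
    pvMx (l.map fun x => a * f x) = a * pvMx (l.map f) := by
  induction l with
  | nil => simp [pvMx]
  | cons x t ih => simp only [List.map_cons, pvMx, List.foldr_cons] at ih ⊢; rw [ih, nat_mul_max]

-- drop terms that are 0 (off the filter)
lemma pvMx_map_filter {α : Type} (l : List α) (q : α → Bool) (f : α → Nat)
    (h : ∀ x ∈ l, q x = false → f x = 0) :
    pvMx ((l.filter q).map f) = pvMx (l.map f) := by
  induction l with
  | nil => rfl
  | cons x t ih =>
    have ih' := ih fun y hy => h y (List.mem_cons_of_mem _ hy)
    simp only [pvMx] at ih' ⊢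
    by_cases hq : q x = true
    · simp only [List.filter_cons, hq, if_true, List.map_cons, List.foldr_cons]
      rw [ih']
    · have hq' : q x = false := by simpa using hq
      simp only [List.filter_cons, hq', Bool.false_eq_true, if_false, List.map_cons,
        List.foldr_cons]
      rw [ih', h x List.mem_cons_self hq', Nat.max_eq_right (Nat.zero_le _)]

-- a foldl accumulating max equals max of start and pvMx of the mapped list
lemma foldl_max_eq {α : Type} (l : List α) (f : α → Nat) (r : Nat) :
    l.foldl (fun r x => max r (f x)) r = max r (pvMx (l.map f)) := by
  induction l generalizing r with
  | nil => simp [pvMx]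
  | cons x t ih =>
    simp only [List.foldl_cons, List.map_cons, pvMx, List.foldr_cons] at ih ⊢
    rw [ih, Nat.max_assoc]

lemma if_gt_eq_max (p r : Nat) : (if p > r then p else r) = max r p := by
  rcases Nat.lt_or_ge r p with h | h
  · simp [h, Nat.max_eq_right (Nat.le_of_lt h)]
  · have : ¬ p > r := Nat.not_lt.2 h
    simp [this, Nat.max_eq_left h]

-- ---- bit toolkit ----
def pvSubm (m c : Nat) : Prop := m &&& c = m

lemma pvSubm_iff {m c : Nat} : pvSubm m c ↔ ∀ i, m.testBit i = true → c.testBit i = true := by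
  constructor
  · intro h i hi
    have := congrArg (fun x => Nat.testBit x i) h
    simpa [Nat.testBit_and, hi] using this
  · intro h
    apply Nat.eq_of_testBit_eq
    intro i
    simp only [Nat.testBit_and]
    cases hm : m.testBit i
    · simp
    · simp [h i hm]

lemma pvXor_bit_lt {m i : Nat} (h : m.testBit i = true) : m ^^^ 2 ^ i < m := by
  apply Nat.lt_of_testBit i
  · simp [Nat.testBit_xor, h]
  · exact h
  · intro j hj
    have : i ≠ j := Nat.ne_of_lt hj
    simp [Nat.testBit_xor, this]

lemma pvXor_bit_subm {m i : Nat} (h : m.testBit i = true) : pvSubm (m ^^^ 2 ^ i) m := by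
  rw [pvSubm_iff]
  intro j hj
  by_cases hij : i = j
  · subst hij; exact h
  · simpa [Nat.testBit_xor, Nat.testBit_two_pow, hij] using hj

lemma pvSubm_xor_of_not_bit {s m i : Nat} (hs : pvSubm s m)
    (hsi : s.testBit i = false) : pvSubm s (m ^^^ 2 ^ i) := by
  rw [pvSubm_iff] at hs ⊢
  intro j hj
  have hij : i ≠ j := by rintro rfl; rw [hj] at hsi; cases hsi
  simp [Nat.testBit_xor, hij, hs j hj]

lemma pvSubm_trans {a b c : Nat} (h1 : pvSubm a b) (h2 : pvSubm b c) : pvSubm a c := by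
  rw [pvSubm_iff] at *
  exact fun i hi => h2 i (h1 i hi)

lemma pvExists_diff_bit {s m : Nat} (hs : pvSubm s m) (hne : s ≠ m) :
    ∃ i, m.testBit i = true ∧ s.testBit i = false := by
  by_contra hc
  push Not at hc
  apply hne
  apply Nat.eq_of_testBit_eq
  intro i
  cases hm : m.testBit i
  · cases hsi : s.testBit i
    · rfl
    · rw [pvSubm_iff] at hs; rw [hs i hsi] at hm; cases hm
  · cases hsi : s.testBit i
    · exact absurd hsi (hc i hm)
    · rfl

lemma pvBit_lt {m i n : Nat} (hm : m < 2 ^ n) (h : m.testBit i = true) : i < n := by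
  by_contra hc
  push Not at hc
  have : m.testBit i = false := Nat.testBit_eq_false_of_lt (lt_of_lt_of_le hm (Nat.pow_le_pow_right (by norm_num) hc))
  rw [this] at h; cases h

lemma pvAnd_eq_zero_iff {a b : Nat} : a &&& b = 0 ↔ ∀ i, a.testBit i = true → b.testBit i = false := by
  constructor
  · intro h i hi
    have := congrArg (fun x => Nat.testBit x i) h
    simp only [Nat.testBit_and, hi, Nat.zero_testBit, Bool.true_and] at this
    exact this
  · intro h
    apply Nat.eq_of_testBit_eq
    intro i
    simp only [Nat.testBit_and, Nat.zero_testBit]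
    cases ha : a.testBit i
    · simp
    · simp [h i ha]

lemma pvDisj_iff {n m1 m2 : Nat} (_h1 : m1 < 2 ^ n) (h2 : m2 < 2 ^ n) :
    m1 &&& m2 = 0 ↔ pvSubm m2 ((2 ^ n - 1) ^^^ m1) := by
  rw [pvAnd_eq_zero_iff, pvSubm_iff]
  constructor
  · intro h i hi
    have hin : i < n := pvBit_lt h2 hi
    have hm1 : m1.testBit i = false := by
      cases hm : m1.testBit i
      · rfl
      · rw [h i hm] at hi; cases hi
    simp [Nat.testBit_xor, Nat.testBit_two_pow_sub_one, hin, hm1]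
  · intro h i hi
    cases hm2 : m2.testBit i
    · rfl
    · have hin : i < n := pvBit_lt h2 hm2
      have := h i hm2
      simp only [Nat.testBit_xor, Nat.testBit_two_pow_sub_one, hin, decide_true] at this
      cases hm1 : m1.testBit i
      · rw [hm1] at hi; cases hi
      · rw [hm1] at this; simp at this

lemma pvShift_eq (i : Nat) : 1 <<< i = 2 ^ i := by
  rw [Nat.shiftLeft_eq, Nat.one_mul]

lemma pvBit_and_ne {mask i : Nat} : (mask &&& (1 <<< i) ≠ 0) ↔ mask.testBit i = true := by
  rw [pvShift_eq, Nat.and_two_pow]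
  cases h : mask.testBit i <;> simp [h, (Nat.two_pow_pos i).ne']

lemma pvSubseq_zero (cs : List Char) : pvSubseq cs 0 = [] := by
  simp [pvSubseq, Nat.zero_and]

lemma pvPl_zero (cs : List Char) : pvPl cs 0 = 0 := by
  simp [pvPl, pvPal, pvSubseq_zero]

-- A's range list rewritten as range'
lemma pvRange_drop (N : Nat) : (List.range N).drop 1 = List.range' 1 (N - 1) := by
  rw [List.range_eq_range', List.drop_range']

lemma pvMem_range'_iff {j k : Nat} : j ∈ List.range' 1 k ↔ 1 ≤ j ∧ j < 1 + k := by
  rw [List.mem_range']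
  constructor
  · rintro ⟨i, hi, rfl⟩; omega
  · intro ⟨h1, h2⟩; exact ⟨j - 1, by omega, by omega⟩

-- ---- characterization of A's dict ----
lemma pvFoldl_cond_insert {κ ν β : Type} [BEq κ] (l : List β) (q : β → Bool) (k : β → κ)
    (v : β → ν) (d : PySem.Dict κ ν) :
    l.foldl (fun d a => if q a then d.insert (k a) (v a) else d) d
      = (l.filter q).foldl (fun d a => d.insert (k a) (v a)) d := by
  induction l generalizing d with
  | nil => rfl
  | cons x t ih => by_cases hq : q x <;> simp [List.filter_cons, hq, ih]


lemma pvPaliDict_items (cs : List Char) :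
    (pvPaliDict cs).items =
      (((List.range (1 <<< cs.length)).drop 1).filter (fun m => pvPal cs m)).map
        (fun m => (m, (pvSubseq cs m).length)) := by
  unfold pvPaliDict
  simp only []
  have hstep : ∀ (d : PySem.Dict Nat Nat) (mask : Nat),
      (if pvSubseq cs mask = (pvSubseq cs mask).reverse then d.insert mask (pvSubseq cs mask).length else d)
        = (if pvPal cs mask then d.insert mask ((pvSubseq cs mask).length) else d) := by
    intro d mask
    simp [pvPal]
  rw [PySem.List.foldl_congr_mem _ _ _ _ (fun d mask _ => hstep d mask)]
  rw [pvFoldl_cond_insert (((List.range (1 <<< cs.length)).drop 1)) (fun m => pvPal cs m)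
    (fun m => m) (fun m => (pvSubseq cs m).length) PySem.Dict.empty]
  have hnd : ((((List.range (1 <<< cs.length)).drop 1).filter (fun m => pvPal cs m)).map (fun m => m)).Nodup := by
    rw [List.map_id']
    exact ((List.drop_sublist 1 _).nodup (List.nodup_range)).filter _
  rw [PySem.Dict.items_foldl_insert_fresh _ (fun m => m) _ _ (fun a _ => PySem.Dict.contains_empty a) hnd]
  simp [PySem.Dict.empty]

-- conditional-set folds: untouched indices keep their value
lemma pvFold_cset_not_mem (l : List Nat) (q : Nat → Bool) (v : Nat → Nat) (a : List Nat)
    (j : Nat) (hj : j ∉ l) :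
    ((l.foldl (fun a m => if q m then a.set m (v m) else a) a).getD j 0) = a.getD j 0 := by
  induction l generalizing a with
  | nil => rfl
  | cons m t ih =>
    have hjm : m ≠ j := fun h => hj (h ▸ List.mem_cons_self)
    have hjt : j ∉ t := fun h => hj (List.mem_cons_of_mem _ h)
    simp only [List.foldl_cons]
    rw [ih _ hjt]
    by_cases hq : q m
    · simp only [hq, if_true, List.getD_eq_getElem?_getD, List.getElem?_set_ne hjm]
    · simp [hq]

lemma pvFold_cset_getD (l : List Nat) (q : Nat → Bool) (v : Nat → Nat) (a : List Nat)
    (hnd : l.Nodup) (hlen : ∀ m ∈ l, m < a.length) (j : Nat) :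
    ((l.foldl (fun a m => if q m then a.set m (v m) else a) a).getD j 0)
      = if j ∈ l ∧ q j then v j else a.getD j 0 := by
  induction l generalizing a with
  | nil => simp
  | cons m t ih =>
    have hndt : t.Nodup := hnd.of_cons
    simp only [List.foldl_cons]
    by_cases hjm : j = m
    · subst hjm
      have hjt : j ∉ t := (List.nodup_cons.1 hnd).1
      rw [pvFold_cset_not_mem t q v _ j hjt]
      by_cases hq : q j
      · simp only [hq, if_true, List.getD_eq_getElem?_getD, List.getElem?_set,
          hlen j List.mem_cons_self, if_true]
        simp [hq]
      · simp [hq]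
    · have hlt : ∀ m' ∈ t, m' < (if q m then a.set m (v m) else a).length := by
        intro m' hm'
        have := hlen m' (List.mem_cons_of_mem _ hm')
        by_cases hq : q m <;> simp [hq, this]
      rw [ih _ hndt hlt]
      have hmem : (j ∈ m :: t ∧ q j) ↔ (j ∈ t ∧ q j) := by
        simp [List.mem_cons, hjm]
      by_cases hc : j ∈ t ∧ q j
      · simp [hc, hmem.2 hc]
      · have hc' : ¬ (j ∈ m :: t ∧ q j) := fun h => hc (hmem.1 h)
        simp only [hc, hc', if_false]
        by_cases hq : q m
        · simp only [hq, if_true, List.getD_eq_getElem?_getD,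
            List.getElem?_set_ne (fun h => hjm h.symm)]
        · simp [hq]


-- ---- characterization of B's plen ----
lemma pvPlen_getD (cs : List Char) (j : Nat) (hj : j < 1 <<< cs.length) :
    (pvPlen cs).getD j 0 = pvPl cs j := by
  unfold pvPlen
  simp only []
  have hstep : ∀ (a : List Nat) (mask : Nat),
      (let subseq := (List.range cs.length).foldl
        (fun acc i => if mask &&& (1 <<< i) ≠ 0 then acc ++ [cs.getD i ' '] else acc) []
       if subseq = subseq.reverse then a.set mask subseq.length else a)
      = (if pvPal cs mask then a.set mask ((pvSubseq cs mask).length) else a) := by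
    intro a mask
    show (if pvSubseq cs mask = (pvSubseq cs mask).reverse
      then a.set mask (pvSubseq cs mask).length else a) = _
    simp [pvPal]
  rw [PySem.List.foldl_congr_mem _ _ _ _ (fun a mask _ => hstep a mask)]
  rw [pvRange_drop]
  rw [pvFold_cset_getD _ _ _ _
    List.nodup_range'
    (by intro m hm
        rw [List.length_replicate]
        have := pvMem_range'_iff.1 hm
        omega)
    j]
  by_cases hc : j ∈ List.range' 1 (1 <<< cs.length - 1) ∧ pvPal cs j
  · simp [hc, pvPl]
  · simp only [hc, if_false]
    have hrep : (List.replicate (1 <<< cs.length) 0).getD j 0 = 0 := by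
      rw [List.getD_eq_getElem?_getD, List.getElem?_replicate]
      by_cases h : j < 1 <<< cs.length <;> simp [h]
    rw [hrep]
    by_cases hj0 : j = 0
    · subst hj0; rw [pvPl_zero]
    · have hjmem : j ∈ List.range' 1 (1 <<< cs.length - 1) := by
        rw [pvMem_range'_iff]
        constructor
        · omega
        · have h1 : 1 ≤ 1 <<< cs.length := by rw [pvShift_eq]; exact Nat.one_le_two_pow
          omega
      have hnp : ¬ pvPal cs j = true := fun h => hc ⟨hjmem, h⟩
      simp [pvPl, hnp]

-- ---- the DP: pvBest computes pvG ----
lemma if_cond_max' (c : Prop) [Decidable c] (r v : Nat) :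
    (if c then max r v else r) = max r (if c then v else 0) := by
  by_cases h : c <;> simp [h]

lemma pvG_zero (cs : List Char) : pvG cs 0 = 0 := by
  unfold pvG
  apply Nat.le_antisymm _ (Nat.zero_le _)
  apply pvMx_le
  intro x hx
  rcases List.mem_map.1 hx with ⟨m, _, rfl⟩
  rw [Nat.and_zero]
  by_cases h : (0 : Nat) = m
  · rw [if_pos h, ← h, pvPl_zero]
  · rw [if_neg h]

lemma pvG_rec (cs : List Char) (mask : Nat) (h2 : mask < 2 ^ cs.length) :
    pvG cs mask = max (pvPl cs mask)
      (pvMx ((List.range cs.length).map (fun i =>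
        if mask &&& (1 <<< i) ≠ 0 then pvG cs (mask ^^^ (1 <<< i)) else 0))) := by
  simp only [pvShift_eq]
  apply Nat.le_antisymm
  · apply pvMx_le
    intro x hx
    rcases List.mem_map.1 hx with ⟨m, hm, rfl⟩
    by_cases hsub : m &&& mask = m
    · by_cases hmm : m = mask
      · subst hmm
        exact le_trans (le_of_eq (by simp [hsub])) (Nat.le_max_left _ _)
      · obtain ⟨i, hbi, hsi⟩ := pvExists_diff_bit hsub hmm
        have hin : i < cs.length := pvBit_lt h2 hbi
        have hsub2 : pvSubm m (mask ^^^ 2 ^ i) := pvSubm_xor_of_not_bit hsub hsi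
        have hsub2' : m &&& (mask ^^^ 2 ^ i) = m := hsub2
        have hple : pvPl cs m ≤ pvG cs (mask ^^^ 2 ^ i) := by
          have hmem := le_pvMx_of_mem
            (List.mem_map_of_mem (f := fun m' => if m' &&& (mask ^^^ 2 ^ i) = m' then pvPl cs m' else 0) hm)
          simpa [hsub2'] using hmem
        have hcond : mask &&& 2 ^ i ≠ 0 := by
          rw [← pvShift_eq]; exact pvBit_and_ne.2 hbi
        have hterm : pvG cs (mask ^^^ 2 ^ i)
            ≤ pvMx ((List.range cs.length).map (fun i =>
                if mask &&& 2 ^ i ≠ 0 then pvG cs (mask ^^^ 2 ^ i) else 0)) := by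
          have hmem2 := le_pvMx_of_mem
            (List.mem_map_of_mem (f := fun i =>
                if mask &&& 2 ^ i ≠ 0 then pvG cs (mask ^^^ 2 ^ i) else 0)
              (List.mem_range.2 hin))
          simpa [hcond] using hmem2
        rw [if_pos hsub]
        exact le_trans (le_trans hple hterm) (Nat.le_max_right _ _)
    · rw [if_neg hsub]
      exact Nat.zero_le _
  · apply Nat.max_le.2
    constructor
    · have hmem := le_pvMx_of_mem
        (List.mem_map_of_mem (f := fun m' => if m' &&& mask = m' then pvPl cs m' else 0)
          (List.mem_range.2 (show mask < 1 <<< cs.length by rw [pvShift_eq]; exact h2)))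
      simpa [Nat.and_self] using hmem
    · apply pvMx_le
      intro x hx
      rcases List.mem_map.1 hx with ⟨i, _, rfl⟩
      by_cases hb : mask &&& 2 ^ i ≠ 0
      · rw [if_pos hb]
        have hbit : mask.testBit i = true := by
          apply pvBit_and_ne.1; rwa [pvShift_eq]
        unfold pvG
        apply pvMx_map_mono
        intro m _
        by_cases hs : m &&& (mask ^^^ 2 ^ i) = m
        · rw [if_pos hs]
          have hsm : m &&& mask = m := pvSubm_trans hs (pvXor_bit_subm hbit)
          rw [if_pos hsm]
        · rw [if_neg hs]
          exact Nat.zero_le _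
      · rw [if_neg hb]
        exact Nat.zero_le _

lemma pvFold_set_length (l : List Nat) (g : List Nat → Nat → Nat) (a : List Nat) :
    (l.foldl (fun a m => a.set m (g a m)) a).length = a.length := by
  induction l generalizing a with
  | nil => rfl
  | cons m t ih => simp [ih]

lemma pvBest_inv (cs : List Char) :
    ∀ (k : Nat), k ≤ 1 <<< cs.length - 1 → ∀ j,
      ((List.range' 1 k).foldl
        (fun best mask =>
          best.set mask ((List.range cs.length).foldl
            (fun b i =>
              if mask &&& (1 <<< i) ≠ 0 then
                let c := best.getD (mask ^^^ (1 <<< i)) 0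
                if c > b then c else b
              else b)
            ((pvPlen cs).getD mask 0)))
        (List.replicate (1 <<< cs.length) 0)).getD j 0
      = if j ≤ k then pvG cs j else 0 := by
  intro k
  induction k with
  | zero =>
    intro _ j
    have hrep : (List.replicate (1 <<< cs.length) 0).getD j 0 = 0 := by
      rw [List.getD_eq_getElem?_getD, List.getElem?_replicate]
      by_cases h : j < 1 <<< cs.length <;> simp [h]
    simp only [List.range'_zero, List.foldl_nil, hrep]
    by_cases hj : j ≤ 0
    · have : j = 0 := by omega
      subst this
      rw [if_pos (le_refl 0), pvG_zero]
    · rw [if_neg hj]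
  | succ k ih =>
    intro hk j
    have hk' : k ≤ 1 <<< cs.length - 1 := by omega
    have hN1 : 1 ≤ 1 <<< cs.length := by rw [pvShift_eq]; exact Nat.one_le_two_pow
    have hkN : k + 1 < 1 <<< cs.length := by omega
    have hconcat : List.range' 1 (k + 1) = List.range' 1 k ++ [k + 1] := by
      rw [List.range'_concat]
      norm_num
      omega
    rw [hconcat, List.foldl_append, List.foldl_cons, List.foldl_nil]
    have hlenB : ((List.range' 1 k).foldl
        (fun best mask =>
          best.set mask ((List.range cs.length).foldl
            (fun b i =>
              if mask &&& (1 <<< i) ≠ 0 then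
                let c := best.getD (mask ^^^ (1 <<< i)) 0
                if c > b then c else b
              else b)
            ((pvPlen cs).getD mask 0)))
        (List.replicate (1 <<< cs.length) 0)).length = 1 <<< cs.length := by
      rw [pvFold_set_length, List.length_replicate]
    by_cases hj : j = k + 1
    · subst hj
      rw [List.getD_eq_getElem?_getD, List.getElem?_set, if_pos rfl, hlenB, if_pos hkN]
      simp only [Option.getD_some]
      rw [if_pos (le_refl _)]
      have ihk := ih hk'
      rw [pvPlen_getD cs (k + 1) hkN]
      rw [PySem.List.foldl_congr_mem _ _
        (fun b i => if (k + 1) &&& 1 <<< i ≠ 0 then max b (pvG cs ((k + 1) ^^^ 1 <<< i)) else b) _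
        (by
          intro b i _
          by_cases hc : (k + 1) &&& 1 <<< i ≠ 0
          · have hbit : (k + 1).testBit i = true := pvBit_and_ne.1 hc
            have hlt : (k + 1) ^^^ 1 <<< i < k + 1 := by
              rw [pvShift_eq]; exact pvXor_bit_lt hbit
            have hG := ihk ((k + 1) ^^^ 1 <<< i)
            rw [if_pos (by omega : (k + 1) ^^^ 1 <<< i ≤ k)] at hG
            rw [if_pos hc, if_gt_eq_max, hG]
            exact (if_pos hc).symm
          · rw [if_neg hc]
            exact (if_neg hc).symm)]
      simp only [if_cond_max']
      rw [foldl_max_eq]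
      rw [← pvG_rec cs (k + 1) (by rw [← pvShift_eq]; exact hkN)]
    · rw [List.getD_eq_getElem?_getD, List.getElem?_set_ne (fun h => hj h.symm),
        ← List.getD_eq_getElem?_getD, ih hk']
      by_cases hjk : j ≤ k
      · rw [if_pos hjk, if_pos (by omega)]
      · rw [if_neg hjk, if_neg (by omega)]

lemma pvBest_getD (cs : List Char) (j : Nat) (hj : j < 1 <<< cs.length) :
    (pvBest cs.length (pvPlen cs)).getD j 0 = pvG cs j := by
  unfold pvBest
  rw [pvRange_drop]
  have hN1 : 1 ≤ 1 <<< cs.length := by rw [pvShift_eq]; exact Nat.one_le_two_pow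
  rw [pvBest_inv cs (1 <<< cs.length - 1) (le_refl _) j, if_pos (by omega)]

-- ---- final assembly ----
lemma pvMain (cs : List Char) :
    (pvPaliDict cs).items.foldl
      (fun res p1 => (pvPaliDict cs).items.foldl
        (fun res p2 => if p1.1 &&& p2.1 = 0 then max res (p1.2 * p2.2) else res) res) 0
    = ((List.range (1 <<< cs.length)).drop 1).foldl
        (fun res mask =>
          let p := (pvPlen cs).getD mask 0 *
            (pvBest cs.length (pvPlen cs)).getD (((1 <<< cs.length) - 1) ^^^ mask) 0
          if p > res then p else res) 0 := by
  have hN1 : 1 ≤ 1 <<< cs.length := by rw [pvShift_eq]; exact Nat.one_le_two_pow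
  rw [pvPaliDict_items, pvRange_drop]
  set n := cs.length with hn
  set N := 1 <<< n with hNdef
  set L := (List.range' 1 (N - 1)).filter (fun m => pvPal cs m) with hL
  set F : Nat → Nat := fun m => pvPl cs m * pvG cs ((N - 1) ^^^ m) with hF
  have hmemL : ∀ m ∈ L, pvPal cs m = true ∧ m < N := by
    intro m hm
    rcases List.mem_filter.1 hm with ⟨hmr, hp⟩
    rcases pvMem_range'_iff.1 hmr with ⟨h1, h2⟩
    exact ⟨hp, by omega⟩
  have hrange : List.range N = 0 :: List.range' 1 (N - 1) := by
    rw [List.range_eq_range', show N = (N - 1) + 1 by omega, List.range'_succ]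
    simp
  -- value of pvG at a complement, as a max over L
  have hGL : ∀ c : Nat, pvMx (L.map (fun m2 => if m2 &&& c = m2 then pvPl cs m2 else 0))
      = pvG cs c := by
    intro c
    have hz : ∀ m2 ∈ List.range' 1 (N - 1), (pvPal cs m2) = false →
        (if m2 &&& c = m2 then pvPl cs m2 else 0) = 0 := by
      intro m2 _ hp
      simp [pvPl, hp]
    rw [hL, pvMx_map_filter _ _ _ hz]
    show _ = pvMx ((List.range N).map (fun m2 => if m2 &&& c = m2 then pvPl cs m2 else 0))
    rw [hrange, List.map_cons, pvMx_cons, Nat.zero_and, if_pos rfl, pvPl_zero]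
    exact (Nat.zero_max _).symm
  -- the inner fold of A computes max r (F m)
  have hinner : ∀ (r : Nat), ∀ p1 ∈ L.map (fun m => (m, (pvSubseq cs m).length)),
      (L.map (fun m => (m, (pvSubseq cs m).length))).foldl
        (fun res p2 => if p1.1 &&& p2.1 = 0 then max res (p1.2 * p2.2) else res) r
      = max r (F p1.1) := by
    intro r p1 hp1
    rcases List.mem_map.1 hp1 with ⟨m, hmL, rfl⟩
    rcases hmemL m hmL with ⟨hpal, hmN⟩
    dsimp only
    rw [PySem.List.foldl_congr_mem _ _
      (fun res (p2 : Nat × Nat) => max res (if m &&& p2.1 = 0 then (pvSubseq cs m).length * p2.2 else 0)) _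
      (fun res p2 _ => if_cond_max' _ _ _)]
    rw [foldl_max_eq]
    congr 1
    rw [List.map_map]
    simp only [Function.comp_def]
    have e1 : ∀ m2 ∈ L, (if m &&& m2 = 0 then (pvSubseq cs m).length * (pvSubseq cs m2).length else 0)
        = pvPl cs m * (if m2 &&& ((N - 1) ^^^ m) = m2 then pvPl cs m2 else 0) := by
      intro m2 hm2
      rcases hmemL m2 hm2 with ⟨hpal2, hm2N⟩
      have hdis : m &&& m2 = 0 ↔ m2 &&& ((N - 1) ^^^ m) = m2 := by
        rw [hNdef, pvShift_eq]
        exact pvDisj_iff (by rw [← pvShift_eq, ← hNdef]; exact hmN)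
          (by rw [← pvShift_eq, ← hNdef]; exact hm2N)
      by_cases hd : m &&& m2 = 0
      · rw [if_pos hd, if_pos (hdis.1 hd)]
        simp [pvPl, hpal, hpal2]
      · rw [if_neg hd, if_neg (fun h => hd (hdis.2 h)), Nat.mul_zero]
    rw [List.map_congr_left e1, pvMx_mul, hGL]
  rw [PySem.List.foldl_congr_mem _ _ (fun res (p1 : Nat × Nat) => max res (F p1.1)) _ hinner]
  rw [foldl_max_eq, Nat.zero_max, List.map_map]
  simp only [Function.comp_def]
  -- the right-hand side
  rw [PySem.List.foldl_congr_mem _ _ (fun res mask => max res (F mask)) _ (by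
    intro res mask hmask
    rcases pvMem_range'_iff.1 hmask with ⟨h1, h2⟩
    have hmN : mask < N := by omega
    have hxN : (N - 1) ^^^ mask < N := by
      rw [hNdef, pvShift_eq]
      exact Nat.xor_lt_two_pow
        (by rw [← pvShift_eq, ← hNdef]; omega)
        (by rw [← pvShift_eq, ← hNdef]; exact hmN)
    rw [pvPlen_getD cs mask (hNdef ▸ hmN), pvBest_getD cs _ (hNdef ▸ hxN), if_gt_eq_max])]
  rw [foldl_max_eq, Nat.zero_max]
  exact pvMx_map_filter _ _ _ (by
    intro m _ hp
    simp [hF, pvPl, hp])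

-- ===== VERDICT (by name: the statement is the Claim_ definition above) =====
theorem max_length_palindrome_spec : Claim_equal_max_length_palindrome := by
  intro s _
  unfold Spec_max_length_palindrome max_length_palindrome max_length_palindrome_alt
  simp only
  exact congrArg Int.ofNat (pvMain s.toList)
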